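-- pv_equiv track=rewrite | github.com/dungladungbd/CT4-A03_DoTuanDung | session_6/session_6.py | poss_move
-- ===== SOURCE A (Python) =====
-- n = 5
--
-- def poss_move(board, row, col):
--     poss = []
--     for nrow in range(-2, n+2):
--         for ncol in range(-2, n+2):
--             if (nrow - row) * (ncol - col) == 2 or (nrow - row) * (ncol - col) == -2:
--                 loc = [nrow, ncol]
--                 poss.append(loc)
--     return poss
-- ===== SOURCE B (Python) =====
-- n = 5
--
-- OFFSETS = [(-2, -1), (-2, 1), (-1, -2), (-1, 2), (1, -2), (1, 2), (2, -1), (2, 1)]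
--
-- def poss_move(board, row, col):
--     poss = []
--     for dr, dc in OFFSETS:
--         nrow = row + dr
--         ncol = col + dc
--         if -2 <= nrow < n + 2 and -2 <= ncol < n + 2:
--             poss.append([nrow, ncol])
--     return poss
-- ===== Notes on version B (the rewrite author's own statement) =====
-- stated objective: simpler
-- what changed: B enumerates the 8 knight offsets (pre-sorted lexicographically to reproduce A's grid-scan order) and bound-checks each target, instead of scanning all 81 cells of the (n+4)x(n+4) grid testing a product condition.
import Mathlib
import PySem

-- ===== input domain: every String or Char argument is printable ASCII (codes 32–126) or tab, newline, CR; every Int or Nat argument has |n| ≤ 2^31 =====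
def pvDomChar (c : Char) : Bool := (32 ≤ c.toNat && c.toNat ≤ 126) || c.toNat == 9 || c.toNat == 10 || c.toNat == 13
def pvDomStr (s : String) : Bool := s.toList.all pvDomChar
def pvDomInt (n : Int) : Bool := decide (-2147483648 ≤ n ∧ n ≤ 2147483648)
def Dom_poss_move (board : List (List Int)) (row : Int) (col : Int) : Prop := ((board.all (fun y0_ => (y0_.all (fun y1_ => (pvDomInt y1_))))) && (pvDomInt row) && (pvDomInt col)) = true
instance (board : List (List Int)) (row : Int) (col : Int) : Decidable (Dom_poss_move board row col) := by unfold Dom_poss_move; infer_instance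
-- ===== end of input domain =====

-- B enumerates the 8 knight offsets (sorted to match A's scan order) instead of scanning all 81 grid cells.

-- ===== PORT A =====
def poss_move (board : List (List Int)) (row : Int) (col : Int) : List (List Int) :=
  (PySem.List.pyRange (-2) 7 1).foldl (fun poss nrow =>
    (PySem.List.pyRange (-2) 7 1).foldl (fun poss ncol =>
      if (nrow - row) * (ncol - col) = 2 ∨ (nrow - row) * (ncol - col) = -2 then
        poss ++ [[nrow, ncol]]
      else poss) poss) []

-- ===== PORT B =====
def knightOffsets : List (Int × Int) :=
  [(-2, -1), (-2, 1), (-1, -2), (-1, 2), (1, -2), (1, 2), (2, -1), (2, 1)]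

def poss_move_alt (board : List (List Int)) (row : Int) (col : Int) : List (List Int) :=
  knightOffsets.foldl (fun poss d =>
    if -2 ≤ row + d.1 ∧ row + d.1 < 7 ∧ -2 ≤ col + d.2 ∧ col + d.2 < 7 then
      poss ++ [[row + d.1, col + d.2]]
    else poss) []

-- ===== PRECONDITION & SPEC =====
def Spec_poss_move (board : List (List Int)) (row : Int) (col : Int) (out : List (List Int)) : Prop := out = poss_move_alt board row col
instance (board : List (List Int)) (row : Int) (col : Int) (out : List (List Int)) : Decidable (Spec_poss_move board row col out) := by unfold Spec_poss_move; infer_instance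

-- ===== CLAIM (what is proved, stated in full; the proofs are below) =====
def Claim_equal_poss_move : Prop := ∀ (board : List (List Int)) (row : Int) (col : Int), Dom_poss_move board row col → Spec_poss_move board row col (poss_move board row col)

-- ===== LEMMAS AND PROOFS =====

theorem factor_small {a b : Int} (h : a * b = 2 ∨ a * b = -2) : -2 ≤ a ∧ a ≤ 2 := by
  have hb : b ≠ 0 := by rintro rfl; simp at h
  have habs : |a| * |b| = 2 := by
    rcases h with h | h <;> rw [← abs_mul, h] <;> simp
  have hb1 : 1 ≤ |b| := Int.one_le_abs hb
  have ha2 : |a| ≤ 2 := by nlinarith [abs_nonneg a]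
  constructor
  · linarith [neg_abs_le a]
  · linarith [le_abs_self a]

-- a fold that only appends when its test holds leaves the accumulator unchanged if the test is false everywhere
theorem foldl_if_none {α β : Type} (l : List α) (p : α → Prop) [DecidablePred p]
    (f : α → List β) (acc : List β) (h : ∀ x ∈ l, ¬ p x) :
    l.foldl (fun a x => if p x then a ++ f x else a) acc = acc := by
  induction l generalizing acc with
  | nil => rfl
  | cons y ys ih =>
    simp only [List.foldl_cons]
    rw [if_neg (h y (by simp))]
    exact ih acc (fun x hx => h x (List.mem_cons_of_mem _ hx))

-- a fold whose step fixes the accumulator on every element returns the accumulator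
theorem foldl_id {α β : Type} (l : List α) (g : β → α → β) (acc : β)
    (h : ∀ x ∈ l, ∀ a, g a x = a) : l.foldl g acc = acc := by
  induction l generalizing acc with
  | nil => rfl
  | cons y ys ih =>
    simp only [List.foldl_cons]
    rw [h y (by simp)]
    exact ih acc (fun x hx => h x (List.mem_cons_of_mem _ hx))

theorem range_mem_bounds {x : Int} (hx : x ∈ PySem.List.pyRange (-2) 7 1) : -2 ≤ x ∧ x ≤ 6 := by
  simp only [show PySem.List.pyRange (-2) 7 1 = [-2, -1, 0, 1, 2, 3, 4, 5, 6] from by decide] at hx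
  fin_cases hx <;> omega

theorem poss_move_far_empty (board : List (List Int)) (row col : Int)
    (h : row < -4 ∨ 8 < row ∨ col < -4 ∨ 8 < col) :
    poss_move board row col = [] := by
  unfold poss_move
  apply foldl_id
  intro nrow hnr acc
  apply foldl_if_none
  intro ncol hnc hcond
  have h1 := range_mem_bounds hnr
  have h2 := range_mem_bounds hnc
  have hf1 := factor_small hcond
  have hcond2 : (ncol - col) * (nrow - row) = 2 ∨ (ncol - col) * (nrow - row) = -2 := by
    rw [mul_comm (ncol - col) (nrow - row)]; exact hcond
  have hf2 := factor_small hcond2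
  omega

theorem poss_move_alt_far_empty (board : List (List Int)) (row col : Int)
    (h : row < -4 ∨ 8 < row ∨ col < -4 ∨ 8 < col) :
    poss_move_alt board row col = [] := by
  unfold poss_move_alt
  apply foldl_if_none
  intro d hd
  fin_cases hd <;> simp <;> omega

-- ===== VERDICT (by name: the statement is the Claim_ definition above) =====
theorem poss_move_spec : Claim_equal_poss_move := by
  intro board row col _
  unfold Spec_poss_move
  by_cases hr : -4 ≤ row ∧ row ≤ 8 ∧ -4 ≤ col ∧ col ≤ 8
  · obtain ⟨h1, h2, h3, h4⟩ := hr
    have hA : poss_move board row col = poss_move [] row col := rfl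
    have hB : poss_move_alt board row col = poss_move_alt [] row col := rfl
    rw [hA, hB]
    interval_cases row <;> interval_cases col <;> decide
  · rw [not_and_or, not_and_or, not_and_or] at hr
    push Not at hr
    have h : row < -4 ∨ 8 < row ∨ col < -4 ∨ 8 < col := by omega
    rw [poss_move_far_empty board row col h, poss_move_alt_far_empty board row col h]
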